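-- pv_equiv track=rewrite | github.com/M786453/Advent-of-Code-2024 | Day-25/solution-day-25.py | extract_pins
-- ===== SOURCE A (Python) =====
-- def extract_pins(obj, start, stop, step, pin_offset):
--
--     pins = []
--
--     for col_no in range(len(obj[0])):
--
--         for row_no in range(start, stop, step):
--
--             if obj[row_no][col_no] == '.':
--
--                 pins.append(abs(row_no+pin_offset))
--
--                 break
--
--     return pins
-- ===== SOURCE B (Python) =====
-- def extract_pins(obj, start, stop, step, pin_offset):
--     # One row-major pass: resolve every column while walking the rows once,
--     # stopping as soon as all columns are resolved.
--     ncols = len(obj[0])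
--     res = [None] * ncols
--     if ncols:
--         for row_no in range(start, stop, step):
--             if None not in res:
--                 break
--             row = obj[row_no]
--             for col_no in range(ncols):
--                 if res[col_no] is None and row[col_no] == '.':
--                     res[col_no] = abs(row_no + pin_offset)
--     return [v for v in res if v is not None]
-- ===== Notes on version B (the rewrite author's own statement) =====
-- stated objective: alternative
-- what changed: Replaced A's column-major nested scan (inner row loop with break per column) by a single row-major pass that maintains a per-column result table and stops early once every column is resolved, then emits the resolved entries in column order.
import Mathlib
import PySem

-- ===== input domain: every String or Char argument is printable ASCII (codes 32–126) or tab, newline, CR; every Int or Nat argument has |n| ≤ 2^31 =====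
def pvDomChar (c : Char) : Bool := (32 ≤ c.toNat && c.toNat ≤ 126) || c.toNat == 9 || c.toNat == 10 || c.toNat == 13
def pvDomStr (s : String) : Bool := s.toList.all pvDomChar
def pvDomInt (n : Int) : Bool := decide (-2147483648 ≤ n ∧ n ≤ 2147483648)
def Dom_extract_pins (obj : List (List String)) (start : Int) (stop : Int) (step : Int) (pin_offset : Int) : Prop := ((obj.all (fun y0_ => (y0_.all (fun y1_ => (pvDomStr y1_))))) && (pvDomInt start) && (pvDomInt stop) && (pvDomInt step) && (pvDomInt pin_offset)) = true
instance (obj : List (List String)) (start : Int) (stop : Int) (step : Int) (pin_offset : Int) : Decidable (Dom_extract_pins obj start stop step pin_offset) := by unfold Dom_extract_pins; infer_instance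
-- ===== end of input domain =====

-- B re-implements A in one row-major pass with a per-column result table and an
-- all-resolved early exit (objective: alternative decomposition, same cost class).

-- ===== PORT A =====
-- inner 'for row_no in range(start, stop, step): … break' of A, one column
def pinScanA (obj : List (List String)) (col_no : Nat) (pin_offset : Int) : List Int → Option Int
  | [] => none
  | row_no :: rest =>
    if ((PySem.List.pyGet? obj row_no).getD []).getD col_no "" == "." then
      some |row_no + pin_offset|
    else pinScanA obj col_no pin_offset rest

def extract_pins (obj : List (List String)) (start : Int) (stop : Int) (step : Int) (pin_offset : Int) : List Int :=
  (List.range (obj.headD []).length).foldl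
    (fun pins col_no =>
      match pinScanA obj col_no pin_offset (PySem.List.pyRange start stop step) with
      | some v => pins ++ [v]
      | none => pins) []

-- ===== PORT B =====
-- inner 'for col_no in range(ncols)' of B: update still-unresolved columns from one row
def innerB (row : List String) (row_no : Int) (pin_offset : Int) (ncols : Nat)
    (res : List (Option Int)) : List (Option Int) :=
  (List.range ncols).foldl
    (fun res col_no =>
      if (res.getD col_no none).isNone && (row.getD col_no "" == ".") then
        res.set col_no (some |row_no + pin_offset|)
      else res) res

-- outer 'for row_no in range(start, stop, step)' of B with the 'None not in res' break
def outerB (obj : List (List String)) (pin_offset : Int) (ncols : Nat) :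
    List Int → List (Option Int) → List (Option Int)
  | [], res => res
  | row_no :: rest, res =>
    if res.all (·.isSome) then res
    else outerB obj pin_offset ncols rest
          (innerB ((PySem.List.pyGet? obj row_no).getD []) row_no pin_offset ncols res)

def extract_pins_alt (obj : List (List String)) (start : Int) (stop : Int) (step : Int) (pin_offset : Int) : List Int :=
  let ncols := (obj.headD []).length
  let res := List.replicate ncols none
  let res' := if ncols ≠ 0 then
      outerB obj pin_offset ncols (PySem.List.pyRange start stop step) res
    else res
  res'.filterMap id

-- ===== PRECONDITION & SPEC =====
-- one valid Python cell access obj[r][c] (c a column index ≥ 0); none = IndexError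
def cellB? (obj : List (List String)) (r : Int) (c : Nat) : Option String :=
  (PySem.List.pyGet? obj r).bind (fun row => PySem.List.pyGet? row (c : Int))

-- length of range(start, stop, step) for step ≠ 0, in closed form
def pvRangeLen (start stop step : Int) : Int :=
  if 0 < step then max 0 (PySem.Int.floordiv (stop - start + step - 1) step)
  else max 0 (PySem.Int.floordiv (start - stop - step - 1) (-step))

-- Pre_ excludes exactly the inputs where the Python A raises: empty obj (IndexError on
-- obj[0]); and, when there is at least one column, step = 0 (ValueError) or some column
-- whose scan reaches an out-of-range access before (or at) its first '.' (IndexError).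
-- The quantifier is truncated to the first 2*len(obj)+1 range elements; this is exact,
-- because the strictly monotone row indices leave the valid index window permanently,
-- so an out-of-range access (if any) occurs within that prefix.
def Pre_extract_pins (obj : List (List String)) (start : Int) (stop : Int) (step : Int) (pin_offset : Int) : Prop :=
  obj ≠ [] ∧
    ((obj.headD []).length = 0 ∨
      (step ≠ 0 ∧
        ∀ c < (obj.headD []).length,
          ∀ i < min (pvRangeLen start stop step).toNat (2 * obj.length + 1),
            (∀ j < i, cellB? obj (start + step * (j : Int)) c ≠ some ".") →
            cellB? obj (start + step * (i : Int)) c ≠ none))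
instance (obj : List (List String)) (start : Int) (stop : Int) (step : Int) (pin_offset : Int) : Decidable (Pre_extract_pins obj start stop step pin_offset) := by unfold Pre_extract_pins; infer_instance

def pvWitness_extract_pins : List (List String) × Int × Int × Int × Int :=
  ([["#", "."], [".", "#"]], 0, 2, 1, 0)

def Spec_extract_pins (obj : List (List String)) (start : Int) (stop : Int) (step : Int) (pin_offset : Int) (out : List Int) : Prop := out = extract_pins_alt obj start stop step pin_offset
instance (obj : List (List String)) (start : Int) (stop : Int) (step : Int) (pin_offset : Int) (out : List Int) : Decidable (Spec_extract_pins obj start stop step pin_offset out) := by unfold Spec_extract_pins; infer_instance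

-- ===== CLAIM (what is proved, stated in full; the proofs are below) =====
def Claim_equal_extract_pins : Prop := ∀ (obj : List (List String)) (start : Int) (stop : Int) (step : Int) (pin_offset : Int), Dom_extract_pins obj start stop step pin_offset → Pre_extract_pins obj start stop step pin_offset → Spec_extract_pins obj start stop step pin_offset (extract_pins obj start stop step pin_offset)

-- ===== LEMMAS AND PROOFS =====

-- A's outer fold appends the per-column results: it is a filterMap over the columns.
theorem foldl_opt_append (f : Nat → Option Int) :
    ∀ (l : List Nat) (acc : List Int),
      l.foldl (fun pins c => match f c with | some v => pins ++ [v] | none => pins) acc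
        = acc ++ l.filterMap f := by
  intro l
  induction l with
  | nil => simp
  | cons c cs ih =>
    intro acc
    simp only [List.foldl_cons, List.filterMap_cons]
    cases h : f c <;> simp [h, ih]

theorem innerB_length (row : List String) (row_no : Int) (pin_offset : Int) (ncols : Nat)
    (res : List (Option Int)) : (innerB row row_no pin_offset ncols res).length = res.length := by
  unfold innerB
  generalize List.range ncols = l
  induction l generalizing res with
  | nil => rfl
  | cons c cs ih => simpa using (ih _).trans (by split <;> simp)

theorem innerB_getD (row : List String) (row_no : Int) (pin_offset : Int) :
    ∀ (n : Nat) (res : List (Option Int)), n ≤ res.length → ∀ (c : Nat),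
      (innerB row row_no pin_offset n res).getD c none
        = if c < n then
            (res.getD c none).or
              (if row.getD c "" == "." then some |row_no + pin_offset| else none)
          else res.getD c none := by
  intro n
  induction n with
  | zero => intro res _ c; simp [innerB]
  | succ n ih =>
    intro res hn c
    have hlen : (innerB row row_no pin_offset n res).length = res.length :=
      innerB_length _ _ _ _ _
    have hstep : innerB row row_no pin_offset (n+1) res
        = (fun res c =>
            if (res.getD c none).isNone && (row.getD c "" == ".") then
              res.set c (some |row_no + pin_offset|)
            else res) (innerB row row_no pin_offset n res) n := by
      unfold innerB
      rw [List.range_succ, List.foldl_append, List.foldl_cons, List.foldl_nil]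
    rw [hstep]
    beta_reduce
    have ihc := ih res (by omega)
    by_cases hc : c < n + 1
    · by_cases hcn : c = n
      · subst hcn
        have hprev : (innerB row row_no pin_offset c res).getD c none = res.getD c none := by
          rw [ihc c]; simp
        cases hres : res.getD c none with
        | some a =>
          have hcond : (((innerB row row_no pin_offset c res).getD c none).isNone
              && (row.getD c "" == ".")) = false := by rw [hprev, hres]; simp
          rw [hcond]
          simp only [Bool.false_eq_true, if_false, hprev, hres, if_pos hc, Option.some_or]
        | none =>
          by_cases hdot : row.getD c "" = "."
          · have hcond : (((innerB row row_no pin_offset c res).getD c none).isNone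
                && (row.getD c "" == ".")) = true := by rw [hprev, hres]; simp [List.getD] at hdot ⊢ <;> simp [hdot]
            rw [hcond]
            have hlt : c < (innerB row row_no pin_offset c res).length := by omega
            simp [List.getD] at hdot ⊢ <;> simp [List.getElem?_set, hlt, hc, hdot]
          · have hcond : (((innerB row row_no pin_offset c res).getD c none).isNone
                && (row.getD c "" == ".")) = false := by rw [hprev, hres]; simp [List.getD] at hdot ⊢ <;> simp [hdot]
            rw [hcond]
            simp only [Bool.false_eq_true, if_false, hprev, hres, if_pos hc, Option.none_or]
            simp [List.getD] at hdot ⊢ <;> simp [hdot]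
      · -- c < n : the update at index n does not touch c
        have hcn' : c < n := by omega
        have : ∀ L : List (Option Int),
            ((if (L.getD n none).isNone && (row.getD n "" == ".") then
                L.set n (some |row_no + pin_offset|) else L).getD c none) = L.getD c none := by
          intro L
          split
          · simp [List.getD, List.getElem?_set, hcn, (Ne.symm hcn : n ≠ c)]
          · rfl
        rw [this, ihc c]
        simp [hcn', hc]
    · have hcn : c ≠ n := by omega
      have hcn' : ¬ c < n := by omega
      have : ∀ L : List (Option Int),
          ((if (L.getD n none).isNone && (row.getD n "" == ".") then
              L.set n (some |row_no + pin_offset|) else L).getD c none) = L.getD c none := by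
        intro L
        split
        · simp [List.getD, List.getElem?_set, hcn, (Ne.symm hcn : n ≠ c)]
        · rfl
      rw [this, ihc c]
      simp [hcn', hc]

theorem outerB_length (obj : List (List String)) (pin_offset : Int) (ncols : Nat) :
    ∀ (rows : List Int) (res : List (Option Int)),
      (outerB obj pin_offset ncols rows res).length = res.length := by
  intro rows
  induction rows with
  | nil => intro res; rfl
  | cons r rs ih =>
    intro res
    unfold outerB
    split
    · rfl
    · rw [ih, innerB_length]

theorem outerB_getD (obj : List (List String)) (pin_offset : Int) (ncols : Nat) :
    ∀ (rows : List Int) (res : List (Option Int)), res.length = ncols → ∀ c < ncols,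
      (outerB obj pin_offset ncols rows res).getD c none
        = (res.getD c none).or (pinScanA obj c pin_offset rows) := by
  intro rows
  induction rows with
  | nil => intro res _ c _; simp [outerB, pinScanA]
  | cons r rs ih =>
    intro res hres c hc
    unfold outerB
    split
    · -- all resolved: entry c is some, absorbing the or
      rename_i hall
      have hce : c < res.length := by omega
      have : (res.getD c none).isSome := by
        have := List.all_eq_true.mp hall _ (List.getElem_mem (l := res) (n := c) hce)
        simpa [List.getD, List.getElem?_eq_getElem hce] using this
      obtain ⟨a, ha⟩ := Option.isSome_iff_exists.mp this
      rw [ha, Option.some_or]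
    · rw [ih _ (by rw [innerB_length]; exact hres) c hc,
        innerB_getD _ _ _ ncols res (by omega) c, if_pos hc]
      show _ = (res.getD c none).or (pinScanA obj c pin_offset (r :: rs))
      rw [Option.or_assoc]
      congr 1
      have hrfl : pinScanA obj c pin_offset (r :: rs)
          = if ((PySem.List.pyGet? obj r).getD []).getD c "" == "." then
              some |r + pin_offset|
            else pinScanA obj c pin_offset rs := rfl
      rw [hrfl]
      by_cases hdot : ((PySem.List.pyGet? obj r).getD []).getD c "" = "."
      · simp [List.getD] at hdot ⊢ <;> simp [hdot]
      · simp [List.getD] at hdot ⊢ <;> simp [hdot]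

-- ===== VERDICT (by name: the statement is the Claim_ definition above) =====
theorem extract_pins_spec : Claim_equal_extract_pins := by
  intro obj start stop step pin_offset _ _
  unfold Spec_extract_pins extract_pins extract_pins_alt
  set ncols := (obj.headD []).length with hnc
  set rows := PySem.List.pyRange start stop step with hrows
  rw [foldl_opt_append]
  by_cases hz : ncols = 0
  · simp [hz]
  · simp only [if_pos hz, List.nil_append]
    have hfin : outerB obj pin_offset ncols rows (List.replicate ncols none)
        = (List.range ncols).map (fun c => pinScanA obj c pin_offset rows) := by
      apply List.ext_getElem
      · rw [outerB_length]; simp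
      · intro i h1 h2
        have hi : i < ncols := by
          have := outerB_length obj pin_offset ncols rows (List.replicate ncols none)
          simp [this] at h1; simpa using h1
        have := outerB_getD obj pin_offset ncols rows (List.replicate ncols none)
          (by simp) i hi
        rw [List.getD_eq_getElem _ _ h1] at this
        simp only [List.getElem_map, List.getElem_range]
        rw [this]
        simp [List.getD_replicate]
    rw [hfin, List.filterMap_map]
    simp
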